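-- pv_equiv track=rewrite | github.com/s8n0gre/SIH | project/local-ai-server/google_vit_clean.py | map_to_municipal_category
-- ===== SOURCE A (Python) =====
-- def map_to_municipal_category(class_name):
--     """Map ViT predictions to municipal categories"""
--     class_lower = class_name.lower()
--
--     if any(word in class_lower for word in ['road', 'street', 'pavement', 'asphalt']):
--         return 'Roads & Infrastructure'
--     elif any(word in class_lower for word in ['water', 'fountain', 'hydrant']):
--         return 'Water & Sewer Services'
--     elif any(word in class_lower for word in ['tree', 'plant', 'flower', 'grass']):
--         return 'Parks & Recreation'
--     elif any(word in class_lower for word in ['light', 'lamp', 'pole']):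
--         return 'Electricity & Lighting'
--     elif any(word in class_lower for word in ['trash', 'garbage', 'waste']):
--         return 'Waste Management'
--     elif any(word in class_lower for word in ['building', 'house', 'structure']):
--         return 'Building & Housing'
--     elif any(word in class_lower for word in ['car', 'vehicle', 'traffic']):
--         return 'Transportation'
--     else:
--         return 'Other'
-- ===== SOURCE B (Python) =====
-- _CATEGORIES = (
--     'Roads & Infrastructure',
--     'Water & Sewer Services',
--     'Parks & Recreation',
--     'Electricity & Lighting',
--     'Waste Management',
--     'Building & Housing',
--     'Transportation',
-- )
--
-- # inverted index: keyword -> priority (index of its category in _CATEGORIES)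
-- _KEYWORD_PRIORITY = {
--     'road': 0, 'street': 0, 'pavement': 0, 'asphalt': 0,
--     'water': 1, 'fountain': 1, 'hydrant': 1,
--     'tree': 2, 'plant': 2, 'flower': 2, 'grass': 2,
--     'light': 3, 'lamp': 3, 'pole': 3,
--     'trash': 4, 'garbage': 4, 'waste': 4,
--     'building': 5, 'house': 5, 'structure': 5,
--     'car': 6, 'vehicle': 6, 'traffic': 6,
-- }
--
-- def map_to_municipal_category(class_name):
--     """Map ViT predictions to municipal categories"""
--     class_lower = class_name.lower()
--     best = None
--     for keyword, priority in _KEYWORD_PRIORITY.items():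
--         if keyword in class_lower:
--             best = priority if best is None else min(best, priority)
--     return 'Other' if best is None else _CATEGORIES[best]
-- ===== Notes on version B (the rewrite author's own statement) =====
-- stated objective: alternative
-- what changed: Replaced the if/elif first-match chain by an inverted keyword->priority index: one flat pass over all keywords accumulates the minimum matching priority (no early exit, no per-category branching), which is then used to index a category array; correct because keyword priorities are listed in chain order, so the minimum matching priority equals the first true branch.
import Mathlib
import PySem

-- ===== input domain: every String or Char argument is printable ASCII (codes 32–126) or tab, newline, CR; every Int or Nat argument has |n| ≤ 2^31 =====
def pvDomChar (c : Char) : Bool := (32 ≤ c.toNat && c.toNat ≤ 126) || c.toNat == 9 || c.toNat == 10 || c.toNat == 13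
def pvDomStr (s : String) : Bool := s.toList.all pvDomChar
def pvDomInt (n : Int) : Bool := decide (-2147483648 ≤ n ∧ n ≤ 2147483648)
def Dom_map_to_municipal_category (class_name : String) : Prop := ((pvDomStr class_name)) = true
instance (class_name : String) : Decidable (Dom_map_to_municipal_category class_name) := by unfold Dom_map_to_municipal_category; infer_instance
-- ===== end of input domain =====

-- B replaces A's if/elif first-match chain by an inverted keyword->priority index scanned in one
-- flat pass accumulating the minimum matching priority, then indexing a category array (alternative, same cost).

-- ===== PORT A =====
def map_to_municipal_category (class_name : String) : String :=
  let class_lower := PySem.Str.lower class_name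
  if ["road", "street", "pavement", "asphalt"].any (fun word => PySem.Str.isIn word class_lower) then
    "Roads & Infrastructure"
  else if ["water", "fountain", "hydrant"].any (fun word => PySem.Str.isIn word class_lower) then
    "Water & Sewer Services"
  else if ["tree", "plant", "flower", "grass"].any (fun word => PySem.Str.isIn word class_lower) then
    "Parks & Recreation"
  else if ["light", "lamp", "pole"].any (fun word => PySem.Str.isIn word class_lower) then
    "Electricity & Lighting"
  else if ["trash", "garbage", "waste"].any (fun word => PySem.Str.isIn word class_lower) then
    "Waste Management"
  else if ["building", "house", "structure"].any (fun word => PySem.Str.isIn word class_lower) then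
    "Building & Housing"
  else if ["car", "vehicle", "traffic"].any (fun word => PySem.Str.isIn word class_lower) then
    "Transportation"
  else
    "Other"

-- ===== PORT B =====
def pvCategories : List String :=
  [ "Roads & Infrastructure", "Water & Sewer Services", "Parks & Recreation",
    "Electricity & Lighting", "Waste Management", "Building & Housing", "Transportation" ]

-- inverted index: keyword -> priority (insertion-order items of the Python dict)
def pvKeywordPriority : List (String × Nat) :=
  [ ("road", 0), ("street", 0), ("pavement", 0), ("asphalt", 0),
    ("water", 1), ("fountain", 1), ("hydrant", 1),
    ("tree", 2), ("plant", 2), ("flower", 2), ("grass", 2),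
    ("light", 3), ("lamp", 3), ("pole", 3),
    ("trash", 4), ("garbage", 4), ("waste", 4),
    ("building", 5), ("house", 5), ("structure", 5),
    ("car", 6), ("vehicle", 6), ("traffic", 6) ]

-- the loop: best = priority if best is None else min(best, priority), on a keyword hit
def pvBestStep (class_lower : String) (best : Option Nat) (p : String × Nat) : Option Nat :=
  if PySem.Str.isIn p.1 class_lower then
    match best with
    | none => some p.2
    | some r => some (min r p.2)
  else best

def map_to_municipal_category_alt (class_name : String) : String :=
  let class_lower := PySem.Str.lower class_name
  let best := pvKeywordPriority.foldl (pvBestStep class_lower) none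
  match best with
  | none => "Other"
  | some r => pvCategories.getD r "Other"

-- ===== PRECONDITION & SPEC =====
def Spec_map_to_municipal_category (class_name : String) (out : String) : Prop := out = map_to_municipal_category_alt class_name
instance (class_name : String) (out : String) : Decidable (Spec_map_to_municipal_category class_name out) := by unfold Spec_map_to_municipal_category; infer_instance

-- ===== CLAIM (what is proved, stated in full; the proofs are below) =====
def Claim_equal_map_to_municipal_category : Prop := ∀ (class_name : String), Dom_map_to_municipal_category class_name → Spec_map_to_municipal_category class_name (map_to_municipal_category class_name)

-- ===== LEMMAS AND PROOFS =====

-- first matching keyword's priority (the chain's answer), used only in the proof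
def pvFirstHit (class_lower : String) : List (String × Nat) → Option Nat
  | [] => none
  | p :: rest => if PySem.Str.isIn p.1 class_lower then some p.2 else pvFirstHit class_lower rest

-- once the accumulator holds a priority ≤ every remaining priority, the fold keeps it
theorem pvFold_stable (s : String) (r : Nat) (L : List (String × Nat))
    (h : ∀ p ∈ L, r ≤ p.2) :
    L.foldl (pvBestStep s) (some r) = some r := by
  induction L with
  | nil => rfl
  | cons p rest ih =>
    have hr : r ≤ p.2 := h p (List.mem_cons_self ..)
    have : pvBestStep s (some r) p = some r := by
      unfold pvBestStep
      split_ifs <;> simp [Nat.min_eq_left hr]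
    rw [List.foldl_cons, this]
    exact ih (fun q hq => h q (List.mem_cons_of_mem _ hq))

-- on a priority-nondecreasing list, the min-accumulating fold equals the first hit
theorem pvFold_eq_firstHit (s : String) (L : List (String × Nat))
    (hsorted : L.Pairwise (fun a b => a.2 ≤ b.2)) :
    L.foldl (pvBestStep s) none = pvFirstHit s L := by
  induction L with
  | nil => rfl
  | cons p rest ih =>
    rw [List.foldl_cons]
    rcases List.pairwise_cons.mp hsorted with ⟨hle, hrest⟩
    by_cases hm : PySem.Str.isIn p.1 s = true
    · have h0 : pvBestStep s none p = some p.2 := by unfold pvBestStep; rw [if_pos hm]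
      rw [h0, pvFold_stable s p.2 rest hle, pvFirstHit, if_pos hm]
    · have h0 : pvBestStep s none p = none := by unfold pvBestStep; rw [if_neg hm]
      rw [h0, ih hrest, pvFirstHit, if_neg hm]

-- ===== VERDICT (by name: the statement is the Claim_ definition above) =====
set_option maxHeartbeats 4000000 in
theorem map_to_municipal_category_spec : Claim_equal_map_to_municipal_category := by
  intro class_name _
  unfold Spec_map_to_municipal_category map_to_municipal_category map_to_municipal_category_alt
  set s := PySem.Str.lower class_name with hs
  dsimp only
  rw [pvFold_eq_firstHit s pvKeywordPriority (by unfold pvKeywordPriority; decide)]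
  unfold pvKeywordPriority pvCategories
  cases h1 : PySem.Str.isIn "road" s <;>
  cases h2 : PySem.Str.isIn "street" s <;>
  cases h3 : PySem.Str.isIn "pavement" s <;>
  cases h4 : PySem.Str.isIn "asphalt" s <;>
  simp only [h1, h2, h3, h4, pvFirstHit, List.any_cons, List.any_nil, Bool.or_true, Bool.true_or,
    Bool.or_false, Bool.false_or, Bool.false_eq_true, if_true, if_false, List.getD] <;>
  first
  | rfl
  | (    cases h5 : PySem.Str.isIn "water" s <;>
    cases h6 : PySem.Str.isIn "fountain" s <;>
    cases h7 : PySem.Str.isIn "hydrant" s <;>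
    simp only [h5, h6, h7, pvFirstHit, List.any_cons, List.any_nil, Bool.or_true, Bool.true_or,
      Bool.or_false, Bool.false_or, Bool.false_eq_true, if_true, if_false, List.getD] <;>
    first
    | rfl
    | (      cases h8 : PySem.Str.isIn "tree" s <;>
      cases h9 : PySem.Str.isIn "plant" s <;>
      cases h10 : PySem.Str.isIn "flower" s <;>
      cases h11 : PySem.Str.isIn "grass" s <;>
      simp only [h8, h9, h10, h11, pvFirstHit, List.any_cons, List.any_nil, Bool.or_true, Bool.true_or,
        Bool.or_false, Bool.false_or, Bool.false_eq_true, if_true, if_false, List.getD] <;>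
      first
      | rfl
      | (        cases h12 : PySem.Str.isIn "light" s <;>
        cases h13 : PySem.Str.isIn "lamp" s <;>
        cases h14 : PySem.Str.isIn "pole" s <;>
        simp only [h12, h13, h14, pvFirstHit, List.any_cons, List.any_nil, Bool.or_true, Bool.true_or,
          Bool.or_false, Bool.false_or, Bool.false_eq_true, if_true, if_false, List.getD] <;>
        first
        | rfl
        | (          cases h15 : PySem.Str.isIn "trash" s <;>
          cases h16 : PySem.Str.isIn "garbage" s <;>
          cases h17 : PySem.Str.isIn "waste" s <;>
          simp only [h15, h16, h17, pvFirstHit, List.any_cons, List.any_nil, Bool.or_true, Bool.true_or,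
            Bool.or_false, Bool.false_or, Bool.false_eq_true, if_true, if_false, List.getD] <;>
          first
          | rfl
          | (            cases h18 : PySem.Str.isIn "building" s <;>
            cases h19 : PySem.Str.isIn "house" s <;>
            cases h20 : PySem.Str.isIn "structure" s <;>
            simp only [h18, h19, h20, pvFirstHit, List.any_cons, List.any_nil, Bool.or_true, Bool.true_or,
              Bool.or_false, Bool.false_or, Bool.false_eq_true, if_true, if_false, List.getD] <;>
            first
            | rfl
            | (              cases h21 : PySem.Str.isIn "car" s <;>
              cases h22 : PySem.Str.isIn "vehicle" s <;>
              cases h23 : PySem.Str.isIn "traffic" s <;>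
              simp only [h21, h22, h23, pvFirstHit, List.any_cons, List.any_nil, Bool.or_true, Bool.true_or,
                Bool.or_false, Bool.false_or, Bool.false_eq_true, if_true, if_false, List.getD] <;>
              rfl))))))
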